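-- pv_equiv track=rewrite | github.com/YeharaMewan/career-prediction | backend/agents/conversation_manager.py | _have_similar_key_phrases
-- ===== SOURCE A (Python) =====
-- def _have_similar_key_phrases(question1: str, question2: str) -> bool:
--     """Check if questions contain similar key phrases indicating the same topic."""
--     # Key phrases that indicate similar questions
--     key_phrase_groups = [
--         ["academic", "education", "study", "school", "learning"],
--         ["skills", "abilities", "talents", "strengths", "capabilities"],
--         ["interests", "passion", "enjoy", "like", "prefer"],
--         ["work", "job", "career", "profession", "occupation"],
--         ["personality", "character", "nature", "style", "approach"],
--         ["goals", "ambitions", "objectives", "aims", "aspirations"],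
--         ["experience", "background", "history", "past"]
--     ]
--
--     question1_lower = question1.lower()
--     question2_lower = question2.lower()
--
--     for phrase_group in key_phrase_groups:
--         q1_has_phrases = sum(1 for phrase in phrase_group if phrase in question1_lower)
--         q2_has_phrases = sum(1 for phrase in phrase_group if phrase in question2_lower)
--
--         # If both questions have multiple phrases from the same group, they're likely similar
--         if q1_has_phrases >= 2 and q2_has_phrases >= 2:
--             return True
--
--     return False
-- ===== SOURCE B (Python) =====
-- def _have_similar_key_phrases(question1: str, question2: str) -> bool:
--     """Check if questions contain similar key phrases indicating the same topic."""
--     key_phrase_groups = [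
--         ["academic", "education", "study", "school", "learning"],
--         ["skills", "abilities", "talents", "strengths", "capabilities"],
--         ["interests", "passion", "enjoy", "like", "prefer"],
--         ["work", "job", "career", "profession", "occupation"],
--         ["personality", "character", "nature", "style", "approach"],
--         ["goals", "ambitions", "objectives", "aims", "aspirations"],
--         ["experience", "background", "history", "past"],
--     ]
--     # flatten once into a phrase -> group-index map, so no per-group inner scans remain
--     owner = {p: i for i, g in enumerate(key_phrase_groups) for p in g}
--
--     def group_counts(question):
--         text = question.lower()
--         counts = {}
--         for phrase, gi in owner.items():
--             if phrase in text:
--                 counts[gi] = counts.get(gi, 0) + 1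
--         return counts
--
--     c1 = group_counts(question1)
--     c2 = group_counts(question2)
--     return any(n >= 2 and c2.get(gi, 0) >= 2 for gi, n in c1.items())
-- ===== Notes on version B (the rewrite author's own statement) =====
-- stated objective: alternative
-- what changed: Replaced A's per-group nested loops (count matches of both questions inside each group, early-return) by a flattened phrase->group-index dictionary built once, one flat pass per question accumulating a group-count dictionary, and a final scan of the first question's counter checking the second's; same data, normalization, threshold and results.
import Mathlib
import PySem

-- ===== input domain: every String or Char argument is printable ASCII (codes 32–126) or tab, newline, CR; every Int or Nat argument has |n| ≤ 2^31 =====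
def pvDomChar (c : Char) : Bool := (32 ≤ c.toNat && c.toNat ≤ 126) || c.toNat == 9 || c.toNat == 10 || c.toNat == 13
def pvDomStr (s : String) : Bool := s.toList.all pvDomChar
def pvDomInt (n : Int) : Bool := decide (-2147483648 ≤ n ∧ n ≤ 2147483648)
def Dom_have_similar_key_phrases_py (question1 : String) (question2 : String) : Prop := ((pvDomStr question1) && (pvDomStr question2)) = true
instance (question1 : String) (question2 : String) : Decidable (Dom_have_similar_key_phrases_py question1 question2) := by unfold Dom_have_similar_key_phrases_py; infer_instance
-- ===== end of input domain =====

-- B flattens the groups into one phrase->group-index dict and accumulates per-question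
-- group-count dicts in a single flat pass each (alternative decomposition, same cost).


-- the key_phrase_groups literal, identical in A and B
def pvKeyPhraseGroups : List (List String) :=
  [["academic", "education", "study", "school", "learning"],
   ["skills", "abilities", "talents", "strengths", "capabilities"],
   ["interests", "passion", "enjoy", "like", "prefer"],
   ["work", "job", "career", "profession", "occupation"],
   ["personality", "character", "nature", "style", "approach"],
   ["goals", "ambitions", "objectives", "aims", "aspirations"],
   ["experience", "background", "history", "past"]]

-- ===== PORT A =====
-- A's for-loop with early 'return True': structural recursion over the groups
def pvALoop (q1l : String) (q2l : String) : List (List String) → Bool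
  | [] => false
  | g :: rest =>
    let q1Has : Int := g.foldl (fun acc p => if PySem.Str.isIn p q1l then acc + 1 else acc) 0
    let q2Has : Int := g.foldl (fun acc p => if PySem.Str.isIn p q2l then acc + 1 else acc) 0
    if 2 ≤ q1Has ∧ 2 ≤ q2Has then true else pvALoop q1l q2l rest

def have_similar_key_phrases_py (question1 : String) (question2 : String) : Bool :=
  pvALoop (PySem.Str.lower question1) (PySem.Str.lower question2) pvKeyPhraseGroups

-- ===== PORT B =====
-- B's dict comprehension: owner = {p: i for i, g in enumerate(groups) for p in g}
def pvOwner : PySem.Dict String Int :=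
  (PySem.List.enumerate pvKeyPhraseGroups 0).foldl
    (fun d ig => ig.2.foldl (fun d p => d.insert p ig.1) d) PySem.Dict.empty

-- B's inner helper group_counts(question)
def pvGroupCounts (question : String) : PySem.Dict Int Int :=
  let text := PySem.Str.lower question
  pvOwner.items.foldl
    (fun counts pg =>
      if PySem.Str.isIn pg.1 text then counts.insert pg.2 (counts.getD pg.2 0 + 1) else counts)
    PySem.Dict.empty

def have_similar_key_phrases_py_alt (question1 : String) (question2 : String) : Bool :=
  let c1 := pvGroupCounts question1
  let c2 := pvGroupCounts question2
  c1.items.any (fun gin => decide (2 ≤ gin.2) && decide (2 ≤ c2.getD gin.1 0))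

-- ===== PRECONDITION & SPEC =====
def Spec_have_similar_key_phrases_py (question1 : String) (question2 : String) (out : Bool) : Prop := out = have_similar_key_phrases_py_alt question1 question2
instance (question1 : String) (question2 : String) (out : Bool) : Decidable (Spec_have_similar_key_phrases_py question1 question2 out) := by unfold Spec_have_similar_key_phrases_py; infer_instance

-- ===== CLAIM (what is proved, stated in full; the proofs are below) =====
def Claim_equal_have_similar_key_phrases_py : Prop := ∀ (question1 : String) (question2 : String), Dom_have_similar_key_phrases_py question1 question2 → Spec_have_similar_key_phrases_py question1 question2 (have_similar_key_phrases_py question1 question2)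

-- ===== LEMMAS AND PROOFS =====

-- the per-group count both programs derive from a lowered question
def pvGroup (k : Nat) : List String := pvKeyPhraseGroups.getD k []

def pvCnt (g : List String) (t : String) : Nat :=
  g.countP (fun p => PySem.Str.isIn p t)

-- the flattened (phrase, group-index) list: pvOwner.items
def pvFlat : List (String × Int) :=
  [("academic",0),("education",0),("study",0),("school",0),("learning",0),
   ("skills",1),("abilities",1),("talents",1),("strengths",1),("capabilities",1),
   ("interests",2),("passion",2),("enjoy",2),("like",2),("prefer",2),
   ("work",3),("job",3),("career",3),("profession",3),("occupation",3),
   ("personality",4),("character",4),("nature",4),("style",4),("approach",4),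
   ("goals",5),("ambitions",5),("objectives",5),("aims",5),("aspirations",5),
   ("experience",6),("background",6),("history",6),("past",6)]

set_option maxRecDepth 8192 in
lemma pvOwner_items : pvOwner.items = pvFlat := by decide

-- the membership list the group-count dicts draw their counts from
def pvYs (t : String) : List Int :=
  (pvFlat.filter (fun pg => PySem.Str.isIn pg.1 t)).map (·.2)

lemma pvGroupCounts_eq (q : String) :
    pvGroupCounts q = PySem.Dict.counter (pvYs (PySem.Str.lower q)) := by
  unfold pvGroupCounts pvYs
  rw [pvOwner_items, ← PySem.Dict.foldl_insert_getD_add_one_eq_counter,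
      List.foldl_map, List.foldl_filter]

set_option maxHeartbeats 2000000 in
lemma pvCount_ys (t : String) (k : Nat) (hk : k < 7) :
    (pvYs t).count (k : Int) = pvCnt (pvGroup k) t := by
  unfold pvYs pvCnt pvGroup
  rw [List.count_eq_countP, List.countP_map, List.countP_filter]
  interval_cases k <;>
    · simp only [pvFlat, pvKeyPhraseGroups, List.getD, List.getElem?_cons_zero,
        List.getElem?_cons_succ, Option.getD_some, Function.comp]
      simp only [List.countP_cons, List.countP_nil]
      norm_num
      rfl

lemma pvYs_subset (t : String) : ∀ k ∈ pvYs t, ∃ m : Nat, m < 7 ∧ k = (m : Int) := by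
  intro k hk
  unfold pvYs at hk
  obtain ⟨pg, hpg, rfl⟩ := List.mem_map.mp hk
  have hsnd : pg.2 ∈ pvFlat.map (·.2) := List.mem_map_of_mem (List.mem_filter.mp hpg |>.1)
  simp only [pvFlat, List.map_cons, List.map_nil, List.mem_cons, List.not_mem_nil, or_false] at hsnd
  have hb : 0 ≤ pg.2 ∧ pg.2 < 7 := by rcases hsnd with h|h|h|h|h|h|h|h|h|h|h|h|h|h|h|h|h|h|h|h|h|h|h|h|h|h|h|h|h|h|h|h|h|h <;> omega
  exact ⟨pg.2.toNat, by omega, by omega⟩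

lemma pvALoop_eq_any (q1l q2l : String) (gs : List (List String)) :
    pvALoop q1l q2l gs = gs.any (fun g => decide (2 ≤ pvCnt g q1l) && decide (2 ≤ pvCnt g q2l)) := by
  induction gs with
  | nil => rfl
  | cons g rest ih =>
    simp only [pvALoop, PySem.List.foldl_if_add_one, zero_add]
    rw [List.any_cons, ← ih]
    by_cases h1 : 2 ≤ pvCnt g q1l
    · by_cases h2 : 2 ≤ pvCnt g q2l
      · rw [if_pos ⟨by exact_mod_cast h1, by exact_mod_cast h2⟩,
            decide_eq_true h1, decide_eq_true h2]
        simp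
      · rw [if_neg (fun hc => h2 (by exact_mod_cast hc.2)), decide_eq_false h2]
        simp
    · rw [if_neg (fun hc => h1 (by exact_mod_cast hc.1)), decide_eq_false h1]
      simp

-- B's result as an existence statement over group indices
lemma pvB_iff (q1 q2 : String) :
    have_similar_key_phrases_py_alt q1 q2 = true ↔
      ∃ k : Nat, ∃ h : k < 7,
        2 ≤ pvCnt (pvGroup k) (PySem.Str.lower q1) ∧
        2 ≤ pvCnt (pvGroup k) (PySem.Str.lower q2) := by
  unfold have_similar_key_phrases_py_alt
  simp only [pvGroupCounts_eq]
  rw [List.any_eq_true]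
  constructor
  · rintro ⟨gin, hmem, hp⟩
    rw [PySem.Dict.items_counter, List.mem_map] at hmem
    obtain ⟨k, hkmem, rfl⟩ := hmem
    have hkin : k ∈ pvYs (PySem.Str.lower q1) := (PySem.Set.mem_ofList _ _).mp hkmem
    obtain ⟨m, hm, rfl⟩ := pvYs_subset _ k hkin
    simp only [Bool.and_eq_true, decide_eq_true_eq, PySem.Dict.getD_counter] at hp
    rw [pvCount_ys _ m hm, pvCount_ys _ m hm] at hp
    exact ⟨m, hm, by exact_mod_cast hp.1, by exact_mod_cast hp.2⟩
  · rintro ⟨k, hk, h1, h2⟩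
    refine ⟨((k : Int), ((pvYs (PySem.Str.lower q1)).count (k : Int) : Int)), ?_, ?_⟩
    · rw [PySem.Dict.items_counter, List.mem_map]
      refine ⟨(k : Int), (PySem.Set.mem_ofList _ _).mpr ?_, rfl⟩
      have : 0 < (pvYs (PySem.Str.lower q1)).count (k : Int) := by
        rw [pvCount_ys _ k hk]; omega
      exact List.count_pos_iff.mp this
    · simp only [Bool.and_eq_true, decide_eq_true_eq, PySem.Dict.getD_counter]
      rw [pvCount_ys _ k hk, pvCount_ys _ k hk]
      constructor <;> [exact_mod_cast h1; exact_mod_cast h2]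

lemma pvA_iff (q1 q2 : String) :
    have_similar_key_phrases_py q1 q2 = true ↔
      ∃ k : Nat, ∃ h : k < 7,
        2 ≤ pvCnt (pvGroup k) (PySem.Str.lower q1) ∧
        2 ≤ pvCnt (pvGroup k) (PySem.Str.lower q2) := by
  unfold have_similar_key_phrases_py
  rw [pvALoop_eq_any, List.any_eq_true]
  constructor
  · rintro ⟨g, hg, hp⟩
    obtain ⟨k, hk, rfl⟩ := List.mem_iff_getElem.mp hg
    simp only [Bool.and_eq_true, decide_eq_true_eq] at hp
    have hgd : pvGroup k = pvKeyPhraseGroups[k] := List.getD_eq_getElem _ _ hk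
    exact ⟨k, by simpa [pvKeyPhraseGroups] using hk, by rw [hgd]; exact hp.1, by rw [hgd]; exact hp.2⟩
  · rintro ⟨k, hk, h1, h2⟩
    have hk' : k < pvKeyPhraseGroups.length := by simp [pvKeyPhraseGroups]; omega
    have hgd : pvGroup k = pvKeyPhraseGroups[k] := List.getD_eq_getElem _ _ hk'
    refine ⟨pvGroup k, by rw [hgd]; exact List.getElem_mem hk', ?_⟩
    simp only [Bool.and_eq_true, decide_eq_true_eq]
    exact ⟨h1, h2⟩

-- ===== VERDICT (by name: the statement is the Claim_ definition above) =====
theorem have_similar_key_phrases_py_spec : Claim_equal_have_similar_key_phrases_py := by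
  intro q1 q2 _
  unfold Spec_have_similar_key_phrases_py
  rw [Bool.eq_iff_iff, pvA_iff, pvB_iff]
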